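-- pv_equiv track=rewrite | github.com/AmritM1015/Surya | easy_inference/run_easy_inference.py | required_window_span_minutes
-- ===== SOURCE A (Python) =====
-- def required_window_span_minutes(
--     time_delta_input_minutes: list[int],
--     time_delta_target_minutes: int,
--     rollout_steps: int,
-- ) -> int:
--     required_offsets = list(time_delta_input_minutes) + [
--         (step + 1) * int(time_delta_target_minutes)
--         for step in range(int(rollout_steps) + 1)
--     ]
--     return int(max(required_offsets) - min(required_offsets))
-- ===== SOURCE B (Python) =====
-- def required_window_span_minutes(
--     time_delta_input_minutes: list[int],
--     time_delta_target_minutes: int,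
--     rollout_steps: int,
-- ) -> int:
--     # The rollout targets form the arithmetic sequence t, 2t, ..., (rollout_steps+1)*t,
--     # so only its two endpoints matter; fold them into min/max of the input list alone.
--     t = int(time_delta_target_minutes)
--     last = t * (int(rollout_steps) + 1)
--     lo = min(time_delta_input_minutes, default=t)
--     hi = max(time_delta_input_minutes, default=t)
--     return int(max(hi, t, last) - min(lo, t, last))
-- ===== Notes on version B (the rewrite author's own statement) =====
-- stated objective: faster
-- what changed: B never builds A's combined offset list: it computes the two endpoints t and t*(rollout_steps+1) of the arithmetic target sequence in closed form and combines them with min/max of the input list alone; Pre_ restricts to the natural domain 0 <= rollout_steps, since for negative rollout_steps A's generated range is empty and the targets are silently dropped (and A raises when the input list is also empty).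
-- outside the precondition, e.g. on required_window_span_minutes([5], 3, -2): A returns 0, B returns 8
import Mathlib
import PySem

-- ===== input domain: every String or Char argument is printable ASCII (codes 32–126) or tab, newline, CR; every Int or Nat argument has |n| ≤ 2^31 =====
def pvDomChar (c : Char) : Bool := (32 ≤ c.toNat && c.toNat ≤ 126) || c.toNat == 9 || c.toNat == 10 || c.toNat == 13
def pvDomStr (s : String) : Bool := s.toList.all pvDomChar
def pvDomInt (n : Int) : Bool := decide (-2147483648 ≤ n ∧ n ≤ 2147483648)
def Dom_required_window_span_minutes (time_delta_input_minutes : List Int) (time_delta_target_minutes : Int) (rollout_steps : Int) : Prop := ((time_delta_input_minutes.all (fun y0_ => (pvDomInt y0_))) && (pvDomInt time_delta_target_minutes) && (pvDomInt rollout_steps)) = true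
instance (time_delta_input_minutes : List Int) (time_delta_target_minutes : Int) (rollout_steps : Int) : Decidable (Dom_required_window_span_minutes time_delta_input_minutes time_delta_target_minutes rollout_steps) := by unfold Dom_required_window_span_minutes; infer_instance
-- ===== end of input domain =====

-- B computes the span from the closed-form endpoints of the arithmetic target sequence plus
-- one scan of the input list, instead of materialising and scanning the full offset list.


-- ===== PORT A =====
def required_window_span_minutes (time_delta_input_minutes : List Int) (time_delta_target_minutes : Int) (rollout_steps : Int) : Int :=
  let required_offsets : List Int :=
    time_delta_input_minutes ++
      (PySem.List.pyRange 0 (rollout_steps + 1) 1).map (fun step => (step + 1) * time_delta_target_minutes)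
  (PySem.List.max? required_offsets (fun y => y)).getD 0 -
    (PySem.List.min? required_offsets (fun y => y)).getD 0

-- ===== PORT B =====
def required_window_span_minutes_alt (time_delta_input_minutes : List Int) (time_delta_target_minutes : Int) (rollout_steps : Int) : Int :=
  let t := time_delta_target_minutes
  let last := t * (rollout_steps + 1)
  let lo := (PySem.List.min? time_delta_input_minutes (fun y => y)).getD t
  let hi := (PySem.List.max? time_delta_input_minutes (fun y => y)).getD t
  max (max hi t) last - min (min lo t) last

-- ===== PRECONDITION & SPEC =====
-- Pre_ restricts to the function's natural domain 0 ≤ rollout_steps: for negative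
-- rollout_steps A's generated range is empty, so the target offsets are silently dropped
-- (and A raises ValueError when the input list is empty too).
def Pre_required_window_span_minutes (time_delta_input_minutes : List Int) (time_delta_target_minutes : Int) (rollout_steps : Int) : Prop :=
  0 ≤ rollout_steps
instance (time_delta_input_minutes : List Int) (time_delta_target_minutes : Int) (rollout_steps : Int) : Decidable (Pre_required_window_span_minutes time_delta_input_minutes time_delta_target_minutes rollout_steps) := by unfold Pre_required_window_span_minutes; infer_instance
def pvWitness_required_window_span_minutes : List Int × Int × Int := ([3, -1], 7, 2)

def Spec_required_window_span_minutes (time_delta_input_minutes : List Int) (time_delta_target_minutes : Int) (rollout_steps : Int) (out : Int) : Prop := out = required_window_span_minutes_alt time_delta_input_minutes time_delta_target_minutes rollout_steps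
instance (time_delta_input_minutes : List Int) (time_delta_target_minutes : Int) (rollout_steps : Int) (out : Int) : Decidable (Spec_required_window_span_minutes time_delta_input_minutes time_delta_target_minutes rollout_steps out) := by unfold Spec_required_window_span_minutes; infer_instance

-- ===== CLAIM (what is proved, stated in full; the proofs are below) =====
def Claim_equal_required_window_span_minutes : Prop := ∀ (time_delta_input_minutes : List Int) (time_delta_target_minutes : Int) (rollout_steps : Int), Dom_required_window_span_minutes time_delta_input_minutes time_delta_target_minutes rollout_steps → Pre_required_window_span_minutes time_delta_input_minutes time_delta_target_minutes rollout_steps → Spec_required_window_span_minutes time_delta_input_minutes time_delta_target_minutes rollout_steps (required_window_span_minutes time_delta_input_minutes time_delta_target_minutes rollout_steps)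

-- ===== LEMMAS AND PROOFS =====

theorem pvPyRange_nil (a b : Int) (h : b ≤ a) : PySem.List.pyRange a b 1 = [] := by
  rw [PySem.List.pyRange_one]
  simp [Int.toNat_of_nonpos (by omega : b - a ≤ 0)]

theorem pvMax_absorb (a l c h : Int) (hc : c ≤ max l h) : max (max a l) (max c h) = max a (max l h) := by omega
theorem pvMin_absorb (a l c h : Int) (hc : min l h ≤ c) : min (min a l) (min c h) = min a (min l h) := by omega
theorem pvMax_drop (t c h : Int) (hc : c ≤ max t h) : max t (max c h) = max t h := by omega
theorem pvMin_drop (t c h : Int) (hc : min t h ≤ c) : min t (min c h) = min t h := by omega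

theorem pvSeq_ub (lo hi t : Int) (h : lo + 2 ≤ hi) : (lo + 2) * t ≤ max ((lo + 1) * t) (hi * t) := by
  rcases le_total 0 t with ht | ht
  · exact le_max_of_le_right (by nlinarith)
  · exact le_max_of_le_left (by nlinarith)

theorem pvSeq_lb (lo hi t : Int) (h : lo + 2 ≤ hi) : min ((lo + 1) * t) (hi * t) ≤ (lo + 2) * t := by
  rcases le_total 0 t with ht | ht
  · exact min_le_of_left_le (by nlinarith)
  · exact min_le_of_right_le (by nlinarith)

theorem pvFold_max_seq (t : Int) : ∀ (k : Nat) (lo hi : Int), hi - lo = (k : Int) + 1 → ∀ a,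
    ((PySem.List.pyRange lo hi 1).map (fun s => (s + 1) * t)).foldl max a
      = max a (max ((lo + 1) * t) (hi * t)) := by
  intro k
  induction k with
  | zero =>
      intro lo hi hk a
      have hlt : lo < hi := by omega
      rw [PySem.List.pyRange_one_cons hlt, pvPyRange_nil (lo + 1) hi (by omega)]
      have : hi = lo + 1 := by omega
      subst this
      simp
  | succ k ih =>
      intro lo hi hk a
      have hlt : lo < hi := by omega
      rw [PySem.List.pyRange_one_cons hlt]
      simp only [List.map_cons, List.foldl_cons]
      rw [ih (lo + 1) hi (by omega) (max a ((lo + 1) * t))]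
      have h2 : lo + 1 + 1 = lo + 2 := by ring
      rw [h2]
      exact pvMax_absorb a ((lo + 1) * t) ((lo + 2) * t) (hi * t) (pvSeq_ub lo hi t (by omega))

theorem pvFold_min_seq (t : Int) : ∀ (k : Nat) (lo hi : Int), hi - lo = (k : Int) + 1 → ∀ a,
    ((PySem.List.pyRange lo hi 1).map (fun s => (s + 1) * t)).foldl min a
      = min a (min ((lo + 1) * t) (hi * t)) := by
  intro k
  induction k with
  | zero =>
      intro lo hi hk a
      have hlt : lo < hi := by omega
      rw [PySem.List.pyRange_one_cons hlt, pvPyRange_nil (lo + 1) hi (by omega)]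
      have : hi = lo + 1 := by omega
      subst this
      simp
  | succ k ih =>
      intro lo hi hk a
      have hlt : lo < hi := by omega
      rw [PySem.List.pyRange_one_cons hlt]
      simp only [List.map_cons, List.foldl_cons]
      rw [ih (lo + 1) hi (by omega) (min a ((lo + 1) * t))]
      have h2 : lo + 1 + 1 = lo + 2 := by ring
      rw [h2]
      exact pvMin_absorb a ((lo + 1) * t) ((lo + 2) * t) (hi * t) (pvSeq_lb lo hi t (by omega))

-- ===== VERDICT (by name: the statements are the Claim_ definitions above) =====
theorem required_window_span_minutes_spec : Claim_equal_required_window_span_minutes := by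
  intro xs t r _ hr
  unfold Pre_required_window_span_minutes at hr
  unfold Spec_required_window_span_minutes required_window_span_minutes required_window_span_minutes_alt
  dsimp only
  cases xs with
  | nil =>
      have h0 : (0 : Int) < r + 1 := by omega
      have hmin : (PySem.List.min? ([] : List Int) (fun y => y)).getD t = t := by
        simp [PySem.List.min?]
      have hmax : (PySem.List.max? ([] : List Int) (fun y => y)).getD t = t := by
        simp [PySem.List.max?]
      rw [PySem.List.pyRange_one_cons h0, hmin, hmax]
      simp only [List.nil_append, List.map_cons,
        PySem.List.max?_id_cons, PySem.List.min?_id_cons, Option.getD_some, max_self, min_self]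
      by_cases h1 : r + 1 = 1
      · rw [pvPyRange_nil (0 + 1) (r + 1) (by omega)]
        rw [h1]
        simp
      · have hk : r + 1 - (0 + 1) = ((r - 1).toNat : Int) + 1 := by omega
        rw [pvFold_max_seq t (r - 1).toNat (0 + 1) (r + 1) hk,
            pvFold_min_seq t (r - 1).toNat (0 + 1) (r + 1) hk]
        rw [show ((0 : Int) + 1) * t = t by ring, show ((0 : Int) + 1 + 1) * t = 2 * t by ring,
            show t * (r + 1) = (r + 1) * t by ring]
        rw [pvMax_drop t (2 * t) ((r + 1) * t) (by
              rcases le_total 0 t with ht | ht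
              · exact le_max_of_le_right (by nlinarith)
              · exact le_max_of_le_left (by nlinarith)),
            pvMin_drop t (2 * t) ((r + 1) * t) (by
              rcases le_total 0 t with ht | ht
              · exact min_le_of_left_le (by nlinarith)
              · exact min_le_of_right_le (by nlinarith))]
  | cons x xr =>
      rw [List.cons_append]
      simp only [PySem.List.max?_id_cons, PySem.List.min?_id_cons, Option.getD_some,
        List.foldl_append]
      have hk : r + 1 - (0 : Int) = (r.toNat : Int) + 1 := by omega
      rw [pvFold_max_seq t r.toNat 0 (r + 1) hk, pvFold_min_seq t r.toNat 0 (r + 1) hk]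
      rw [show ((0 : Int) + 1) * t = t by ring, show t * (r + 1) = (r + 1) * t by ring]
      rw [max_assoc, min_assoc]
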